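-- pv_equiv track=rewrite | github.com/decaftundra/searchEngine | retriever.py | and_function
-- ===== SOURCE A (Python) =====
-- def and_function(posting_list, answer):
--     temp_list = list(answer)
--     answer = []
--     for posting in posting_list:
--             if posting in temp_list:
--                     answer.append(posting)
--
--     answer = sorted(list(set(answer)))
--     temp_list = []
--     bool_operator = ''
--
--     return bool_operator, answer
-- ===== SOURCE B (Python) =====
-- def and_function(posting_list, answer):
--     a = sorted(posting_list)
--     b = sorted(answer)
--     i, j = 0, 0
--     result = []
--     while i < len(a) and j < len(b):
--         if a[i] < b[j]:
--             i += 1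
--         elif b[j] < a[i]:
--             j += 1
--         else:
--             v = a[i]
--             result.append(v)
--             while i < len(a) and a[i] == v:
--                 i += 1
--             while j < len(b) and b[j] == v:
--                 j += 1
--     return '', result
-- ===== Notes on version B (the rewrite author's own statement) =====
-- stated objective: faster
-- what changed: Replaces the quadratic filter-by-membership plus sorted(set(...)) with a sort of each list followed by a two-pointer merge intersection that skips duplicate runs, producing the sorted deduplicated intersection directly.
import Mathlib
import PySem

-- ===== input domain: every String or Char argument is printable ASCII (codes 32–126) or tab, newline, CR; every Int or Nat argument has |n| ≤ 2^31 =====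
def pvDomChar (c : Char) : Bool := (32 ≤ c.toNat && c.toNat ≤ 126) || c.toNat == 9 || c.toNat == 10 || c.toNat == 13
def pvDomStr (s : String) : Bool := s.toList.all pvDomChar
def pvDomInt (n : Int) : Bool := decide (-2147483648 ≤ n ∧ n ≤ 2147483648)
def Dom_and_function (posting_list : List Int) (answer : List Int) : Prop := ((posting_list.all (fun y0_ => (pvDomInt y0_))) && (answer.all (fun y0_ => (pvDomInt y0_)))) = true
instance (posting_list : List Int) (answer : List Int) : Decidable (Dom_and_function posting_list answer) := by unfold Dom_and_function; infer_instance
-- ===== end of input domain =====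

-- B replaces A's quadratic membership filter + sorted(set(...)) by sorting copies of both
-- lists and intersecting them with a duplicate-skipping two-pointer merge (objective: faster).

-- ===== PORT A =====
def and_function (posting_list : List Int) (answer : List Int) : String × List Int :=
  -- temp_list = list(answer); answer = []; for posting in posting_list: if posting in temp_list: answer.append(posting)
  let temp_list := answer
  let answer := posting_list.foldl (fun acc posting =>
    if temp_list.contains posting then acc ++ [posting] else acc) []
  -- answer = sorted(list(set(answer)))
  let answer := PySem.List.sorted (PySem.Set.ofList answer) (fun x => x) false
  let bool_operator := ""
  (bool_operator, answer)

-- ===== PORT B =====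
-- the two-pointer merge loop of Source B: advance on the smaller head; on equality emit the
-- value once and skip the run of equal elements on both sides
def interMerge : List Int → List Int → List Int
  | [], _ => []
  | _ :: _, [] => []
  | x :: xs, y :: ys =>
    if x < y then interMerge xs (y :: ys)
    else if y < x then interMerge (x :: xs) ys
    else x :: interMerge ((x :: xs).dropWhile (fun z => z == x))
                         ((y :: ys).dropWhile (fun z => z == x))
  termination_by a b => a.length + b.length
  decreasing_by
    all_goals first
    | (simp; done)
    | (simp; omega)
    | (have hxy : y = x := by omega
       subst hxy
       have h1 := List.length_dropWhile_le (fun z => z == y) xs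
       have h2 := List.length_dropWhile_le (fun z => z == y) ys
       simp at h1 h2 ⊢
       omega)

def and_function_alt (posting_list : List Int) (answer : List Int) : String × List Int :=
  let a := PySem.List.sorted posting_list (fun x => x) false
  let b := PySem.List.sorted answer (fun x => x) false
  ("", interMerge a b)

-- ===== PRECONDITION & SPEC =====
def Spec_and_function (posting_list : List Int) (answer : List Int) (out : String × List Int) : Prop := out = and_function_alt posting_list answer
instance (posting_list : List Int) (answer : List Int) (out : String × List Int) : Decidable (Spec_and_function posting_list answer out) := by unfold Spec_and_function; infer_instance

-- ===== CLAIM (what is proved, stated in full; the proofs are below) =====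
def Claim_equal_and_function : Prop := ∀ (posting_list : List Int) (answer : List Int), Dom_and_function posting_list answer → Spec_and_function posting_list answer (and_function posting_list answer)

-- ===== LEMMAS AND PROOFS =====

-- in a ≤-sorted list whose elements are all ≥ v, everything left after dropping the run of v's is > v
lemma dropWhile_gt (v : Int) : ∀ (l : List Int), l.Pairwise (· ≤ ·) → (∀ z ∈ l, v ≤ z) →
    ∀ e ∈ l.dropWhile (fun z => z == v), v < e := by
  intro l
  induction l with
  | nil => simp
  | cons h t ih =>
    intro hp hge e he
    rw [List.dropWhile_cons] at he
    by_cases hv : h = v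
    · simp [hv] at he
      exact ih (List.pairwise_cons.mp hp).2
        (fun z hz => hge z (List.mem_cons_of_mem _ hz)) e he
    · simp [hv] at he
      have hvh : v < h := lt_of_le_of_ne (hge h (List.mem_cons_self)) (Ne.symm hv)
      rcases he with rfl | he
      · exact hvh
      · exact lt_of_lt_of_le hvh ((List.pairwise_cons.mp hp).1 e he)

lemma mem_dropWhile_of_ne (v : Int) : ∀ (l : List Int), ∀ x ∈ l, x ≠ v →
    x ∈ l.dropWhile (fun z => z == v) := by
  intro l
  induction l with
  | nil => simp
  | cons h t ih =>
    intro x hx hne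
    rw [List.dropWhile_cons]
    by_cases hv : h = v
    · simp [hv]
      rcases List.mem_cons.mp hx with rfl | hx
      · exact absurd hv hne
      · exact ih x hx hne
    · simpa [hv] using hx

lemma interMerge_spec : ∀ (a b : List Int), a.Pairwise (· ≤ ·) → b.Pairwise (· ≤ ·) →
    (interMerge a b).Pairwise (· < ·) ∧ ∀ x, x ∈ interMerge a b ↔ x ∈ a ∧ x ∈ b := by
  intro a b
  induction a, b using interMerge.induct with
  | case1 b => simp [interMerge]
  | case2 x xs => simp [interMerge]
  | case3 x xs y ys hlt ih =>
    intro ha hb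
    rw [interMerge, if_pos hlt]
    obtain ⟨hpw, hmem⟩ := ih (List.pairwise_cons.mp ha).2 hb
    refine ⟨hpw, fun z => ?_⟩
    rw [hmem z]
    constructor
    · rintro ⟨h1, h2⟩; exact ⟨List.mem_cons_of_mem _ h1, h2⟩
    · rintro ⟨h1, h2⟩
      rcases List.mem_cons.mp h1 with rfl | h1
      · -- z = x ∈ y :: ys contradicts x < y
        have : y ≤ z := by
          rcases List.mem_cons.mp h2 with rfl | h2
          · exact le_refl _
          · exact (List.pairwise_cons.mp hb).1 z h2
        omega
      · exact ⟨h1, h2⟩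
  | case4 x xs y ys hlt hlt' ih =>
    intro ha hb
    rw [interMerge, if_neg hlt, if_pos hlt']
    obtain ⟨hpw, hmem⟩ := ih ha (List.pairwise_cons.mp hb).2
    refine ⟨hpw, fun z => ?_⟩
    rw [hmem z]
    constructor
    · rintro ⟨h1, h2⟩; exact ⟨h1, List.mem_cons_of_mem _ h2⟩
    · rintro ⟨h1, h2⟩
      rcases List.mem_cons.mp h2 with rfl | h2
      · have : x ≤ z := by
          rcases List.mem_cons.mp h1 with rfl | h1
          · exact le_refl _
          · exact (List.pairwise_cons.mp ha).1 z h1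
        omega
      · exact ⟨h1, h2⟩
  | case5 x xs y ys hlt hlt' ih =>
    intro ha hb
    have hxy : x = y := by omega
    rw [interMerge, if_neg hlt, if_neg hlt']
    have hgea : ∀ z ∈ x :: xs, x ≤ z := by
      intro z hz
      rcases List.mem_cons.mp hz with rfl | hz
      · exact le_refl _
      · exact (List.pairwise_cons.mp ha).1 z hz
    have hgeb : ∀ z ∈ y :: ys, x ≤ z := by
      intro z hz
      rcases List.mem_cons.mp hz with rfl | hz
      · omega
      · have := (List.pairwise_cons.mp hb).1 z hz; omega
    have hda : (List.dropWhile (fun z => z == x) (x :: xs)).Pairwise (· ≤ ·) :=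
      List.Pairwise.sublist (List.dropWhile_sublist _) ha
    have hdb : (List.dropWhile (fun z => z == x) (y :: ys)).Pairwise (· ≤ ·) :=
      List.Pairwise.sublist (List.dropWhile_sublist _) hb
    obtain ⟨hpw, hmem⟩ := ih hda hdb
    have hgta := dropWhile_gt x (x :: xs) ha hgea
    have hgtb := dropWhile_gt x (y :: ys) hb hgeb
    constructor
    · refine List.pairwise_cons.mpr ⟨?_, hpw⟩
      intro z hz
      exact hgta z (((hmem z).mp hz).1)
    · intro z
      rw [List.mem_cons, hmem z]
      constructor
      · rintro (rfl | ⟨h1, h2⟩)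
        · exact ⟨List.mem_cons_self, hxy ▸ List.mem_cons_self⟩
        · exact ⟨(List.dropWhile_sublist _).mem h1, (List.dropWhile_sublist _).mem h2⟩
      · rintro ⟨h1, h2⟩
        by_cases hzx : z = x
        · exact Or.inl hzx
        · exact Or.inr ⟨mem_dropWhile_of_ne x _ z h1 hzx, mem_dropWhile_of_ne x _ z h2 hzx⟩

-- ===== VERDICT (by name: the statement is the Claim_ definition above) =====
theorem and_function_spec : Claim_equal_and_function := by
  intro posting_list answer _
  unfold Spec_and_function and_function and_function_alt
  simp only [Prod.mk.injEq, true_and]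
  set a := PySem.List.sorted posting_list (fun x => x) false with ha
  set b := PySem.List.sorted answer (fun x => x) false with hb
  have hpa : a.Pairwise (· ≤ ·) := PySem.List.sorted_pairwise posting_list (fun x => x)
  have hpb : b.Pairwise (· ≤ ·) := PySem.List.sorted_pairwise answer (fun x => x)
  obtain ⟨hpw, hmem⟩ := interMerge_spec a b hpa hpb
  -- A's filtered accumulator is a filter
  rw [PySem.List.foldl_append_if_eq_filter]
  -- identify sorted(set(filter)) with the merge result
  apply PySem.List.sorted_eq_of_perm_of_pairwise_lt
  · -- interMerge a b ~ Set.ofList (filter)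
    rw [List.perm_ext_iff_of_nodup
      (hpw.imp (fun h => ne_of_lt h))
      (PySem.Set.nodup_ofList _)]
    intro z
    rw [hmem z, PySem.Set.mem_ofList]
    simp [List.mem_filter, ha, hb, PySem.List.mem_sorted]
  · exact hpw
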